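-- pv_equiv track=rewrite | github.com/AWAlexWeber/python-practice | LeetCode/Solved/Easy/DestinationCity.py | fasterDestCity
-- ===== SOURCE A (Python) =====
-- from typing import List
--
-- def fasterDestCity(paths: List[List[str]]) -> str:
--     # Keeping track of two sets, one of the possible solutions
--     # And one that has entries that have occured twice
--     h = set() # All not possible options
--     e = set() # All possible options
--
--     # Note that by definition our only valid options for set e are second position options
--     for p in paths:
--         if p[1] in e and p[1] not in h:
--             e.remove(p[1])
--             h.add(p[1])
--         elif p[1] not in h:
--             e.add(p[1])
--
--         if p[0] in e and p[0] not in h: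
--             e.remove(p[0])
--             h.add(p[0])
--         else:
--             h.add(p[0])
--
--     return e.pop()
-- ===== SOURCE B (Python) =====
-- def fasterDestCity(paths):
--     # One counting pass: the destination city is the unique city that occurs
--     # exactly once over both positions, and that occurrence is as p[1].
--     cnt = {}
--     for p in paths:
--         cnt[p[1]] = cnt.get(p[1], 0) + 1
--         cnt[p[0]] = cnt.get(p[0], 0) + 1
--     return next(p[1] for p in paths if cnt[p[1]] == 1)
-- ===== Notes on version B (the rewrite author's own statement) =====
-- stated objective: simpler
-- what changed: Replaced A's online two-set toggle machine (move a city between 'possible' and 'impossible' sets while scanning) by one counting pass over both positions followed by a scan returning the first destination whose total occurrence count is 1.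
-- outside the precondition, e.g. on fasterDestCity([['f', 'b'], ['d', 'c']]): A returns 'c', B returns 'b'
import Mathlib
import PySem

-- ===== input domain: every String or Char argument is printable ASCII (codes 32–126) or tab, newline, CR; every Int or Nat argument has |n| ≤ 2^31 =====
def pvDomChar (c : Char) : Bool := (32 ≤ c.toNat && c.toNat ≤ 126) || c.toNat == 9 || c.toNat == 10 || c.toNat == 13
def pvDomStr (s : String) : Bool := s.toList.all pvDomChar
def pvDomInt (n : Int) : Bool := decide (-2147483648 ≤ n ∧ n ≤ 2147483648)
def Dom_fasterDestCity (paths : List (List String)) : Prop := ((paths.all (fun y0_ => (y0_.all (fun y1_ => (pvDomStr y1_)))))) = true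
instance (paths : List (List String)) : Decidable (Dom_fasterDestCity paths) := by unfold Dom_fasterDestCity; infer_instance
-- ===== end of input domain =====

-- B replaces A's online two-set toggle machine by one counting pass plus a scan for the
-- first destination occurring exactly once overall (objective: simpler; same O(n) cost).

-- ===== PORT A =====
-- one loop iteration of A: process p[1] (toggle into e, or retire into h), then p[0] (always retire into h)
def pvStepA (st : PySem.Set String × PySem.Set String) (p : List String) :
    PySem.Set String × PySem.Set String :=
  let b := PySem.List.pyGetD p 1 ""      -- p[1]; total form, exact under Pre_ (2 ≤ p.length)
  let a := PySem.List.pyGetD p 0 ""      -- p[0]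
  let he1 :=
    if b ∈ st.2 ∧ b ∉ st.1 then
      -- e.remove(p[1]); h.add(p[1])  (membership just tested, so discard = remove)
      (PySem.Set.add st.1 b, PySem.Set.discard st.2 b)
    else if b ∉ st.1 then (st.1, PySem.Set.add st.2 b)
    else (st.1, st.2)
  if a ∈ he1.2 ∧ a ∉ he1.1 then
    (PySem.Set.add he1.1 a, PySem.Set.discard he1.2 a)
  else (PySem.Set.add he1.1 a, he1.2)

def fasterDestCity (paths : List (List String)) : String :=
  -- h = "all not possible options", e = "all possible options"
  let st := paths.foldl pvStepA (PySem.Set.empty, PySem.Set.empty)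
  -- e.pop(): Pre_ guarantees e is a singleton set, where pop returns its unique element
  st.2.headD ""

-- ===== PORT B =====
-- one loop iteration of B: cnt[p[1]] = cnt.get(p[1], 0) + 1; cnt[p[0]] = cnt.get(p[0], 0) + 1
def pvStepB (cnt : PySem.Dict String Int) (p : List String) : PySem.Dict String Int :=
  let cnt1 := cnt.insert (PySem.List.pyGetD p 1 "") (cnt.getD (PySem.List.pyGetD p 1 "") 0 + 1)
  cnt1.insert (PySem.List.pyGetD p 0 "") (cnt1.getD (PySem.List.pyGetD p 0 "") 0 + 1)

def fasterDestCity_alt (paths : List (List String)) : String :=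
  let cnt := paths.foldl pvStepB PySem.Dict.empty
  -- next(p[1] for p in paths if cnt[p[1]] == 1); Pre_ guarantees the generator is non-empty
  match paths.find? (fun p => cnt.getD (PySem.List.pyGetD p 1 "") 0 == 1) with
  | some p => PySem.List.pyGetD p 1 ""
  | none => ""

-- ===== PRECONDITION & SPEC =====
-- first / second components of the paths, and the candidate cities: destinations whose
-- total number of occurrences (in either position) is exactly one
def pvFirsts (paths : List (List String)) : List String := paths.map (fun p => p.getD 0 "")
def pvSeconds (paths : List (List String)) : List String := paths.map (fun p => p.getD 1 "")
def pvCands (paths : List (List String)) : List String :=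
  (PySem.Set.ofList (pvSeconds paths)).filter
    (fun c => (pvFirsts paths).count c + (pvSeconds paths).count c == 1)

-- Pre_ excludes (i) paths entries shorter than 2, on which A raises IndexError, and (ii) inputs
-- without exactly one candidate city: with none, A's e.pop() raises KeyError (and B's next(...)
-- raises StopIteration); with several, A's set.pop() picks by hash order — an accident of the
-- set implementation — while B returns the first candidate in path order.
def Pre_fasterDestCity (paths : List (List String)) : Prop :=
  (∀ p ∈ paths, 2 ≤ p.length) ∧ (pvCands paths).length = 1
instance (paths : List (List String)) : Decidable (Pre_fasterDestCity paths) := by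
  unfold Pre_fasterDestCity; infer_instance

def pvWitness_fasterDestCity : List (List String) := [["ATL", "SFO"]]

def Spec_fasterDestCity (paths : List (List String)) (out : String) : Prop := out = fasterDestCity_alt paths
instance (paths : List (List String)) (out : String) : Decidable (Spec_fasterDestCity paths out) := by unfold Spec_fasterDestCity; infer_instance

-- ===== CLAIM (what is proved, stated in full; the proofs are below) =====
def Claim_equal_fasterDestCity : Prop := ∀ (paths : List (List String)), Dom_fasterDestCity paths → Pre_fasterDestCity paths → Spec_fasterDestCity paths (fasterDestCity paths)

-- ===== LEMMAS AND PROOFS =====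

theorem pvGet0 (p : List String) : PySem.List.pyGetD p 0 "" = p.getD 0 "" := by simp [pysem]
theorem pvGet1 (p : List String) : PySem.List.pyGetD p 1 "" = p.getD 1 "" := by simp [pysem]

theorem pvCountAppend (l : List String) (x c : String) :
    (l ++ [x]).count c = l.count c + (if x = c then 1 else 0) := by
  by_cases h : x = c <;> simp [List.count_append, h]

theorem pvF_append (xs : List (List String)) (p : List String) :
    pvFirsts (xs ++ [p]) = pvFirsts xs ++ [p.getD 0 ""] := by simp [pvFirsts]
theorem pvS_append (xs : List (List String)) (p : List String) :
    pvSeconds (xs ++ [p]) = pvSeconds xs ++ [p.getD 1 ""] := by simp [pvSeconds]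

theorem pvStepB_count (xs : List (List String)) (c : String) :
    (xs.foldl pvStepB PySem.Dict.empty).getD c 0 =
      ((pvFirsts xs).count c + (pvSeconds xs).count c : Int) := by
  induction xs using List.reverseRecOn with
  | nil => simp [pvFirsts, pvSeconds]
  | append_singleton xs p ih =>
    rw [List.foldl_append, List.foldl_cons, List.foldl_nil,
        pvF_append, pvS_append, pvCountAppend, pvCountAppend]
    simp only [pvStepB, pvGet0, pvGet1]
    set d := xs.foldl pvStepB PySem.Dict.empty with hd
    set a := p.getD 0 "" with ha
    set b := p.getD 1 "" with hb
    by_cases hac : a = c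
    · subst hac
      rw [PySem.Dict.getD_insert_self, if_pos rfl]
      by_cases hba : b = a
      · rw [hba, PySem.Dict.getD_insert_self, ih, if_pos rfl]
        push_cast; ring
      · rw [PySem.Dict.getD_insert_of_ne _ _ _ (fun h => hba h.symm), ih, if_neg hba]
        push_cast; ring
    · rw [PySem.Dict.getD_insert_of_ne _ _ _ (fun h => hac h.symm), if_neg hac]
      by_cases hbc : b = c
      · rw [hbc, PySem.Dict.getD_insert_self, ih, if_pos rfl]
        push_cast; ring
      · rw [PySem.Dict.getD_insert_of_ne _ _ _ (fun h => hbc h.symm), ih, if_neg hbc]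
        push_cast; ring

set_option maxHeartbeats 2000000 in
theorem pvStepA_inv (xs : List (List String)) :
    (∀ c, c ∈ (xs.foldl pvStepA (PySem.Set.empty, PySem.Set.empty)).1 ↔
        0 < (pvFirsts xs).count c ∨ 2 ≤ (pvFirsts xs).count c + (pvSeconds xs).count c) ∧
    (∀ c, c ∈ (xs.foldl pvStepA (PySem.Set.empty, PySem.Set.empty)).2 ↔
        (pvFirsts xs).count c = 0 ∧ (pvSeconds xs).count c = 1) ∧
    (xs.foldl pvStepA (PySem.Set.empty, PySem.Set.empty)).2.Nodup := by
  induction xs using List.reverseRecOn with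
  | nil => simp [pvFirsts, pvSeconds, PySem.Set.empty]
  | append_singleton xs p ih =>
    obtain ⟨Hh, He, Nd⟩ := ih
    rw [List.foldl_append, List.foldl_cons, List.foldl_nil]
    simp only [pvStepA, pvGet0, pvGet1, pvF_append, pvS_append, pvCountAppend]
    generalize p.getD 0 "" = a
    generalize p.getD 1 "" = b
    set st := xs.foldl pvStepA (PySem.Set.empty, PySem.Set.empty) with hst
    split_ifs with h1 h2 h3 h4 h5
    all_goals refine ⟨fun c => ?_, fun c => ?_, ?_⟩
    all_goals try (first
      | exact Nd
      | exact PySem.Set.nodup_add _ _ Nd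
      | exact PySem.Set.nodup_discard _ _ Nd
      | exact PySem.Set.nodup_discard _ _ (PySem.Set.nodup_add _ _ Nd)
      | exact PySem.Set.nodup_discard _ _ (PySem.Set.nodup_discard _ _ Nd))
    all_goals try simp only [PySem.Set.mem_add, PySem.Set.mem_discard, Hh, He] at h1
    all_goals try simp only [PySem.Set.mem_add, PySem.Set.mem_discard, Hh, He] at h2
    all_goals try simp only [PySem.Set.mem_add, PySem.Set.mem_discard, Hh, He] at h3
    all_goals try simp only [PySem.Set.mem_add, PySem.Set.mem_discard, Hh, He] at h4
    all_goals try simp only [PySem.Set.mem_add, PySem.Set.mem_discard, Hh, He] at h5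
    all_goals simp only [PySem.Set.mem_add, PySem.Set.mem_discard, Hh, He]
    all_goals (rcases eq_or_ne a c with hac | hac <;> rcases eq_or_ne b c with hbc | hbc <;>
      rcases eq_or_ne a b with hab | hab <;>
      (try exact absurd (hac.trans hbc.symm) hab) <;>
      (try exact absurd (hab.symm.trans hac) hbc) <;>
      (first | (have F1 : (a = c) = True := eq_true hac) | (have F1 : (a = c) = False := eq_false hac)) <;>
      (first | (have F2 : (c = a) = True := eq_true hac.symm) | (have F2 : (c = a) = False := eq_false (Ne.symm hac))) <;>
      (first | (have F3 : (b = c) = True := eq_true hbc) | (have F3 : (b = c) = False := eq_false hbc)) <;>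
      (first | (have F4 : (c = b) = True := eq_true hbc.symm) | (have F4 : (c = b) = False := eq_false (Ne.symm hbc))) <;>
      (first | (have F5 : (a = b) = True := eq_true hab) | (have F5 : (a = b) = False := eq_false hab)) <;>
      (first | (have F6 : (b = a) = True := eq_true hab.symm) | (have F6 : (b = a) = False := eq_false (Ne.symm hab))) <;>
      (first
        | (have G1 : List.count a (pvFirsts xs) = List.count c (pvFirsts xs) ∧
              List.count a (pvSeconds xs) = List.count c (pvSeconds xs) := by
            rw [show a = c from of_eq_true F1]; exact ⟨rfl, rfl⟩)
        | (have G1 : (0:Nat) = 0 := rfl)) <;>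
      (first
        | (have G2 : List.count b (pvFirsts xs) = List.count c (pvFirsts xs) ∧
              List.count b (pvSeconds xs) = List.count c (pvSeconds xs) := by
            rw [show b = c from of_eq_true F3]; exact ⟨rfl, rfl⟩)
        | (have G2 : (0:Nat) = 0 := rfl)) <;>
      (try simp only [ne_eq, F1, F2, F3, F4, F5, F6, if_true, if_false, ite_true, ite_false,
            true_and, and_true, false_and, and_false, true_or, or_true, false_or, or_false,
            not_true, not_false_iff, iff_true, true_iff, iff_false, false_iff, not_not,
            not_true_eq_false, not_false_eq_true] at h1) <;>
      (try simp only [ne_eq, F1, F2, F3, F4, F5, F6, if_true, if_false, ite_true, ite_false,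
            true_and, and_true, false_and, and_false, true_or, or_true, false_or, or_false,
            not_true, not_false_iff, iff_true, true_iff, iff_false, false_iff, not_not,
            not_true_eq_false, not_false_eq_true] at h2) <;>
      (try simp only [ne_eq, F1, F2, F3, F4, F5, F6, if_true, if_false, ite_true, ite_false,
            true_and, and_true, false_and, and_false, true_or, or_true, false_or, or_false,
            not_true, not_false_iff, iff_true, true_iff, iff_false, false_iff, not_not,
            not_true_eq_false, not_false_eq_true] at h3) <;>
      (try simp only [ne_eq, F1, F2, F3, F4, F5, F6, if_true, if_false, ite_true, ite_false,
            true_and, and_true, false_and, and_false, true_or, or_true, false_or, or_false,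
            not_true, not_false_iff, iff_true, true_iff, iff_false, false_iff, not_not,
            not_true_eq_false, not_false_eq_true] at h4) <;>
      (try simp only [ne_eq, F1, F2, F3, F4, F5, F6, if_true, if_false, ite_true, ite_false,
            true_and, and_true, false_and, and_false, true_or, or_true, false_or, or_false,
            not_true, not_false_iff, iff_true, true_iff, iff_false, false_iff, not_not,
            not_true_eq_false, not_false_eq_true] at h5) <;>
      (try simp only [ne_eq, F1, F2, F3, F4, F5, F6, if_true, if_false, ite_true, ite_false,
            true_and, and_true, false_and, and_false, true_or, or_true, false_or, or_false,
            not_true, not_false_iff, iff_true, true_iff, iff_false, false_iff, not_not,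
            not_true_eq_false, not_false_eq_true]) <;>
      omega)
theorem pvMemCands (paths : List (List String)) (c : String) :
    c ∈ pvCands paths ↔
      (pvFirsts paths).count c = 0 ∧ (pvSeconds paths).count c = 1 := by
  unfold pvCands
  rw [List.mem_filter, PySem.Set.mem_ofList, ← List.count_pos_iff, beq_iff_eq]
  omega

theorem pvMain (paths : List (List String))
    (hlen : (pvCands paths).length = 1) :
    fasterDestCity paths = fasterDestCity_alt paths := by
  obtain ⟨c0, hc0⟩ := List.length_eq_one_iff.mp hlen
  have hmem : ∀ x, ((pvFirsts paths).count x = 0 ∧ (pvSeconds paths).count x = 1) ↔ x = c0 := by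
    intro x
    rw [← pvMemCands, hc0, List.mem_singleton]
  -- A side
  obtain ⟨Hh, He, Nd⟩ := pvStepA_inv paths
  have he : (paths.foldl pvStepA (PySem.Set.empty, PySem.Set.empty)).2 = [c0] := by
    refine List.perm_singleton.mp ?_
    refine (List.perm_ext_iff_of_nodup Nd (List.nodup_singleton _)).2 ?_
    intro x
    rw [He x, List.mem_singleton, hmem x]
  -- B side
  have hcnt := pvStepB_count paths
  have hc0mem : c0 ∈ pvCands paths := by rw [hc0]; exact List.mem_singleton_self c0
  have hc0counts := (pvMemCands paths c0).mp hc0mem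
  have hc0sec : c0 ∈ pvSeconds paths := by
    rw [← List.count_pos_iff]; omega
  obtain ⟨q0, hq0mem, hq0⟩ := List.mem_map.mp hc0sec
  have hfind : ∃ q ∈ paths,
      ((paths.foldl pvStepB PySem.Dict.empty).getD (PySem.List.pyGetD q 1 "") 0 == 1) = true := by
    refine ⟨q0, hq0mem, ?_⟩
    rw [pvGet1, hq0, hcnt c0, beq_iff_eq]
    omega
  unfold fasterDestCity fasterDestCity_alt
  cases hfq : paths.find? (fun p =>
      (paths.foldl pvStepB PySem.Dict.empty).getD (PySem.List.pyGetD p 1 "") 0 == 1) with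
  | none =>
    exfalso
    obtain ⟨q, hqm, hqp⟩ := hfind
    exact absurd hqp (by simpa using List.find?_eq_none.mp hfq q hqm)
  | some q =>
    have hpq := List.find?_some hfq
    have hqmem := List.mem_of_find?_eq_some hfq
    have hs : q.getD 1 "" = c0 := by
      apply (hmem (q.getD 1 "")).mp
      rw [pvGet1, beq_iff_eq, hcnt] at hpq
      have hsec : q.getD 1 "" ∈ pvSeconds paths := List.mem_map.mpr ⟨q, hqmem, rfl⟩
      rw [← List.count_pos_iff] at hsec
      constructor <;> omega
    simp only [he, hfq, List.headD]
    rw [pvGet1, hs]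

-- ===== VERDICT (by name: the statement is the Claim_ definition above) =====
theorem fasterDestCity_spec : Claim_equal_fasterDestCity := by
  intro paths _ hpre
  unfold Spec_fasterDestCity
  exact pvMain paths hpre.2
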